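-- pv_equiv track=rewrite | github.com/thecontextcache/contextcache | api/app/analyzer/core.py | _build_pack
-- ===== SOURCE A (Python) =====
-- _PACK_ORDER = ["decision", "definition", "finding", "todo", "code", "doc", "link", "note"]
--
-- def _build_pack(query: str, items: list[tuple[str, str]]) -> str:
--     """Format (type, content) pairs into a structured text pack."""
--     lines = ["PROJECT MEMORY PACK", f"Query: {query}", ""]
--     grouped: dict[str, list[str]] = {}
--     for t, c in items:
--         grouped.setdefault(t, []).append(c)
--
--     for t in _PACK_ORDER:
--         if t in grouped:
--             lines.append(f"{t.upper()}:")
--             for c in grouped[t]: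
--                 lines.append(f"- {c}")
--             lines.append("")
--
--     for t, arr in grouped.items():
--         if t in _PACK_ORDER:
--             continue
--         lines.append(f"{t.upper()}:")
--         for c in arr:
--             lines.append(f"- {c}")
--         lines.append("")
--
--     return "\n".join(lines).strip()
-- ===== SOURCE B (Python) =====
-- _PACK_ORDER = ["decision", "definition", "finding", "todo", "code", "doc", "link", "note"]
--
-- def _build_pack(query: str, items: list[tuple[str, str]]) -> str:
--     """Format (type, content) pairs into a structured text pack."""
--     seen = list(dict.fromkeys(t for t, _ in items))
--     order = [t for t in _PACK_ORDER if t in seen] + [t for t in seen if t not in _PACK_ORDER]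
--     lines = ["PROJECT MEMORY PACK", f"Query: {query}", ""]
--     for t in order:
--         lines.append(t.upper() + ":")
--         lines.extend("- " + c for t2, c in items if t2 == t)
--         lines.append("")
--     return "\n".join(lines).strip()
-- ===== Notes on version B (the rewrite author's own statement) =====
-- stated objective: alternative
-- what changed: B drops the grouping dict entirely: it first computes the ordered list of distinct types (known types in _PACK_ORDER order, the rest in first-appearance order) and then emits every section in one uniform loop that filters items per type, replacing A's dict build plus two separate emission loops.
import Mathlib
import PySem

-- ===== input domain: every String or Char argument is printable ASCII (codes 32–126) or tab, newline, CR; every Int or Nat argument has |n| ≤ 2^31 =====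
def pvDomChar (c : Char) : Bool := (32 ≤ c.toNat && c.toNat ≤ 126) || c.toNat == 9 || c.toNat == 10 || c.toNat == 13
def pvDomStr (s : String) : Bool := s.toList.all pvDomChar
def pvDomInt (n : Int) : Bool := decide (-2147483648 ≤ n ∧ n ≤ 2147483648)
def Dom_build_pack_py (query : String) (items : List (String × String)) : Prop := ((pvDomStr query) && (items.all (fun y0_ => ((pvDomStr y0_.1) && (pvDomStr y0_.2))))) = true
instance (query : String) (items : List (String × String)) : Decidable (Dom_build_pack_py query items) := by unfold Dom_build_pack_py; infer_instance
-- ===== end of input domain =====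

-- B drops A's grouping dict: it computes the ordered list of distinct types first and
-- emits all sections in one uniform loop that filters the items per type (objective: alternative).

-- ===== PORT A =====
def packOrderA : List String := ["decision", "definition", "finding", "todo", "code", "doc", "link", "note"]

def build_pack_py (query : String) (items : List (String × String)) : String :=
  let lines : List String := ["PROJECT MEMORY PACK", "Query: " ++ query, ""]
  -- grouped.setdefault(t, []).append(c)  ==  grouped[t] = grouped.get(t, []) + [c]
  let grouped : PySem.Dict String (List String) :=
    items.foldl (fun g p => g.modify p.1 [] (fun a => a ++ [p.2])) PySem.Dict.empty
  let lines := packOrderA.foldl (fun acc t =>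
      if grouped.contains t then
        ((grouped.getD t []).foldl (fun a c => a ++ ["- " ++ c])
          (acc ++ [PySem.Str.upper t ++ ":"])) ++ [""]
      else acc) lines
  let lines := grouped.items.foldl (fun acc p =>
      if packOrderA.contains p.1 then acc
      else (p.2.foldl (fun a c => a ++ ["- " ++ c])
          (acc ++ [PySem.Str.upper p.1 ++ ":"])) ++ [""]) lines
  PySem.Str.strip (PySem.Str.join "\n" lines)

-- ===== PORT B =====
def packOrderB : List String := ["decision", "definition", "finding", "todo", "code", "doc", "link", "note"]

def build_pack_py_alt (query : String) (items : List (String × String)) : String :=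
  let seen := PySem.List.dedup (items.map (fun p => p.1))
  let order := packOrderB.filter (fun t => seen.contains t)
               ++ seen.filter (fun t => !packOrderB.contains t)
  let lines : List String := ["PROJECT MEMORY PACK", "Query: " ++ query, ""]
  let lines := order.foldl (fun acc t =>
      acc ++ ((PySem.Str.upper t ++ ":")
        :: (items.filter (fun p => p.1 == t)).map (fun p => "- " ++ p.2) ++ [""])) lines
  PySem.Str.strip (PySem.Str.join "\n" lines)

-- ===== PRECONDITION & SPEC =====
def Spec_build_pack_py (query : String) (items : List (String × String)) (out : String) : Prop := out = build_pack_py_alt query items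
instance (query : String) (items : List (String × String)) (out : String) : Decidable (Spec_build_pack_py query items out) := by unfold Spec_build_pack_py; infer_instance

-- ===== CLAIM (what is proved, stated in full; the proofs are below) =====
def Claim_equal_build_pack_py : Prop := ∀ (query : String) (items : List (String × String)), Dom_build_pack_py query items → Spec_build_pack_py query items (build_pack_py query items)

-- ===== LEMMAS AND PROOFS =====

-- 'for x in l: if p(x): out += g(x)'
theorem foldl_if_append_flatMap {α β : Type} (l : List α) (p : α → Bool) (g : α → List β) (acc : List β) :
    l.foldl (fun acc x => if p x then acc ++ g x else acc) acc
      = acc ++ (l.filter p).flatMap g := by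
  induction l generalizing acc with
  | nil => simp
  | cons x l ih =>
    by_cases h : p x <;> simp [h, ih, List.append_assoc]

-- 'for x in l: if p(x): continue; out += g(x)'
theorem foldl_if_skip_flatMap {α β : Type} (l : List α) (p : α → Bool) (g : α → List β) (acc : List β) :
    l.foldl (fun acc x => if p x then acc else acc ++ g x) acc
      = acc ++ (l.filter (fun x => !p x)).flatMap g := by
  induction l generalizing acc with
  | nil => simp
  | cons x l ih =>
    by_cases h : p x <;> simp [h, ih, List.append_assoc]

theorem grouped_getD (items : List (String × String)) (t : String) :
    (items.foldl (fun g p => g.modify p.1 [] (fun a => a ++ [p.2]))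
        (PySem.Dict.empty : PySem.Dict String (List String))).getD t []
      = (items.filter (fun p => p.1 == t)).map (fun p => p.2) := by
  rw [PySem.Dict.getD_foldl_modify_append]
  simp

theorem grouped_keys (items : List (String × String)) :
    (items.foldl (fun g p => g.modify p.1 [] (fun a => a ++ [p.2]))
        (PySem.Dict.empty : PySem.Dict String (List String))).keys
      = PySem.List.dedup (items.map (fun p => p.1)) := by
  rw [PySem.Dict.keys_foldl_modify_key]
  rfl

theorem grouped_keys_nodup (items : List (String × String)) :
    (items.foldl (fun g p => g.modify p.1 [] (fun a => a ++ [p.2]))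
        (PySem.Dict.empty : PySem.Dict String (List String))).keys.Nodup := by
  apply PySem.Dict.nodup_keys_foldl_modify_key
  simp


theorem flatten_map_singleton {α β : Type} (f : α → β) (l : List α) :
    (List.map (fun x => [f x]) l).flatten = List.map f l := by
  induction l <;> simp_all

theorem loop_select (l : List String) (p : String → Bool) (v : String → List String) (acc : List String) :
    l.foldl (fun acc t =>
      if p t then ((v t).foldl (fun a c => a ++ ["- " ++ c]) (acc ++ [PySem.Str.upper t ++ ":"])) ++ [""]
      else acc) acc
    = acc ++ (l.filter p).flatMap
        (fun t => (PySem.Str.upper t ++ ":") :: ((v t).map (fun c => "- " ++ c) ++ [""])) := by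
  rw [← foldl_if_append_flatMap]
  congr 1
  funext a t
  by_cases h : p t <;> simp [h, flatten_map_singleton]

theorem loop_skip (l : List String) (p : String → Bool) (v : String → List String) (acc : List String) :
    l.foldl (fun acc t =>
      if p t then acc
      else ((v t).foldl (fun a c => a ++ ["- " ++ c]) (acc ++ [PySem.Str.upper t ++ ":"])) ++ [""]) acc
    = acc ++ (l.filter (fun t => !p t)).flatMap
        (fun t => (PySem.Str.upper t ++ ":") :: ((v t).map (fun c => "- " ++ c) ++ [""])) := by
  rw [← foldl_if_skip_flatMap]
  congr 1
  funext a t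
  by_cases h : p t <;> simp [h, flatten_map_singleton]

-- ===== VERDICT (by name: the statement is the Claim_ definition above) =====

theorem build_pack_py_spec : Claim_equal_build_pack_py := by
  intro query items _
  unfold Spec_build_pack_py build_pack_py build_pack_py_alt
  dsimp only
  refine congrArg PySem.Str.strip (congrArg (PySem.Str.join "\n") ?_)
  set grouped := items.foldl (fun g p => g.modify p.1 [] (fun a => a ++ [p.2]))
        (PySem.Dict.empty : PySem.Dict String (List String)) with hg
  rw [PySem.Dict.items_eq_map_keys grouped (hg ▸ grouped_keys_nodup items) [], List.foldl_map]
  rw [loop_select packOrderA (fun t => grouped.contains t) (fun t => grouped.getD t [])]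
  rw [loop_skip grouped.keys (fun t => packOrderA.contains t) (fun t => grouped.getD t [])]
  rw [PySem.List.foldl_append_eq_flatMap]
  rw [List.flatMap_append]
  have hsec : (fun t => (PySem.Str.upper t ++ ":") :: ((grouped.getD t []).map (fun c => "- " ++ c) ++ [""]))
      = fun t => (PySem.Str.upper t ++ ":")
          :: ((items.filter (fun p => p.1 == t)).map (fun p => "- " ++ p.2) ++ [""]) := by
    funext t
    rw [hg, grouped_getD items t, List.map_map]
    rfl
  have hkeys : grouped.keys = PySem.List.dedup (items.map (fun p => p.1)) := hg ▸ grouped_keys items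
  have hord : packOrderA = packOrderB := rfl
  have hcont : (fun t => grouped.contains t)
      = fun t => (PySem.List.dedup (items.map (fun p => p.1))).contains t := by
    funext t
    rw [PySem.Dict.contains_eq_decide_mem_keys, hkeys, List.contains_eq_mem]
  rw [hsec, hkeys, hord, hcont, List.append_assoc]
  simp only [List.cons_append]
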